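-- pv_equiv track=rewrite | github.com/Tony0783/fileindexingproject | content_classifier.py | remove_duplicate_examples
-- ===== SOURCE A (Python) =====
-- def remove_duplicate_examples(example_lines, max_examples=50):
--     seen = set()
--     deduped = []
--     for line in example_lines:
--         if line not in seen:
--             seen.add(line)
--             deduped.append(line)
--         if len(deduped) >= max_examples:
--             break
--     return deduped
-- ===== SOURCE B (Python) =====
-- def remove_duplicate_examples(example_lines, max_examples=50):
--     # First-occurrence index map: iterate the enumeration in reverse so that
--     # overwriting leaves each line mapped to its smallest index.
--     first = {}
--     for i, line in reversed(list(enumerate(example_lines))):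
--         first[line] = i
--     # A line belongs to the dedup exactly when it sits at its first occurrence.
--     deduped = [line for i, line in enumerate(example_lines) if first[line] == i]
--     return deduped[:max(max_examples, 0)]
-- ===== Notes on version B (the rewrite author's own statement) =====
-- stated objective: alternative
-- what changed: Replaces A's fused seen-set accumulator loop with cap-and-break by three staged passes: a first-occurrence index map built by overwriting in reverse enumeration order (no membership test, no break), a positional filter keeping lines that sit at their first-occurrence index, and a final slice.
-- intended difference: For max_examples <= 0 with a nonempty list, A returns [first line] because it checks the bound only after appending, while B returns [], the intended result when zero examples are requested. — e.g. on remove_duplicate_examples(["a"], 0): A returns ["a"], B returns []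
import Mathlib
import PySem

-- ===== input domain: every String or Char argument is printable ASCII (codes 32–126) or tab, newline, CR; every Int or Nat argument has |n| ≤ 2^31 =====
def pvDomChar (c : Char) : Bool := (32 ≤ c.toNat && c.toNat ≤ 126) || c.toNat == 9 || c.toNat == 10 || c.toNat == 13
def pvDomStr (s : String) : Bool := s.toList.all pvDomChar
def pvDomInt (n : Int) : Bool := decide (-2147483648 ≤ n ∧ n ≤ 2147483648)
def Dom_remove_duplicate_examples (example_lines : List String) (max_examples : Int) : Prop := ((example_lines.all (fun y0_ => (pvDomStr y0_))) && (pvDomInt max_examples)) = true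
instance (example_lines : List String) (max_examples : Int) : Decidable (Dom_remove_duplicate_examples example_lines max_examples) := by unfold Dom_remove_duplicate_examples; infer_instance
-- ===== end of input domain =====

-- B replaces A's fused seen-set loop with cap-and-break by three staged passes:
-- a first-occurrence index map built by overwriting in reverse enumeration order,
-- a positional filter (keep a line iff it sits at its first-occurrence index),
-- and a final slice; equal cost, different algorithm ("alternative").

-- ===== PORT A =====
-- A's loop: state (seen, deduped); per line, maybe add; then break if len(deduped) >= max_examples.
def pvAGo (seen : PySem.Set String) (deduped : List String) (xs : List String) (m : Int) : List String :=
  match xs with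
  | [] => deduped
  | line :: rest =>
    let st := if !(PySem.Set.contains seen line) then (seen.add line, deduped ++ [line]) else (seen, deduped)
    if (st.2.length : Int) ≥ m then st.2 else pvAGo st.1 st.2 rest m

def remove_duplicate_examples (example_lines : List String) (max_examples : Int) : List String :=
  pvAGo (PySem.Set.ofList []) [] example_lines max_examples

-- ===== PORT B =====
-- B's first loop: first[line] = i over reversed(list(enumerate(example_lines))).
def pvFirstIdx (xs : List String) : PySem.Dict String Int :=
  ((PySem.List.enumerate xs).reverse).foldl (fun d p => d.insert p.2 p.1) PySem.Dict.empty

def remove_duplicate_examples_alt (example_lines : List String) (max_examples : Int) : List String :=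
  let first := pvFirstIdx example_lines
  -- comprehension: first[line] always exists (built from the same list), so the
  -- lookup is ported as get? compared with some i
  let deduped := (PySem.List.enumerate example_lines).filterMap
    (fun p => if first.get? p.2 == some p.1 then some p.2 else none)
  PySem.List.slice deduped none (some (max max_examples 0))

-- ===== PRECONDITION & SPEC =====
-- For max_examples <= 0 with a nonempty list, A returns [first line] because it checks the
-- bound only after appending, while B returns [], the intended result when zero examples
-- are requested.
def D_remove_duplicate_examples (example_lines : List String) (max_examples : Int) : Prop :=
  max_examples ≤ 0 ∧ example_lines ≠ []
instance (example_lines : List String) (max_examples : Int) : Decidable (D_remove_duplicate_examples example_lines max_examples) := by unfold D_remove_duplicate_examples; infer_instance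

def Spec_remove_duplicate_examples (example_lines : List String) (max_examples : Int) (out : List String) : Prop := ¬ D_remove_duplicate_examples example_lines max_examples → out = remove_duplicate_examples_alt example_lines max_examples
instance (example_lines : List String) (max_examples : Int) (out : List String) : Decidable (Spec_remove_duplicate_examples example_lines max_examples out) := by unfold Spec_remove_duplicate_examples; infer_instance

def pvDiffWitness_remove_duplicate_examples : List String × Int := (["a"], 0)
def pvDiffWitnessOut_remove_duplicate_examples : (List String) × (List String) := (["a"], [])

-- ===== CLAIM (what is proved, stated in full; the proofs are below) =====
def Claim_unchanged_remove_duplicate_examples : Prop := ∀ (example_lines : List String) (max_examples : Int), Dom_remove_duplicate_examples example_lines max_examples → Spec_remove_duplicate_examples example_lines max_examples (remove_duplicate_examples example_lines max_examples)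
def Claim_changed_remove_duplicate_examples : Prop := Dom_remove_duplicate_examples (pvDiffWitness_remove_duplicate_examples.1) (pvDiffWitness_remove_duplicate_examples.2) ∧ D_remove_duplicate_examples (pvDiffWitness_remove_duplicate_examples.1) (pvDiffWitness_remove_duplicate_examples.2) ∧ remove_duplicate_examples (pvDiffWitness_remove_duplicate_examples.1) (pvDiffWitness_remove_duplicate_examples.2) = pvDiffWitnessOut_remove_duplicate_examples.1 ∧ remove_duplicate_examples_alt (pvDiffWitness_remove_duplicate_examples.1) (pvDiffWitness_remove_duplicate_examples.2) = pvDiffWitnessOut_remove_duplicate_examples.2 ∧ pvDiffWitnessOut_remove_duplicate_examples.1 ≠ pvDiffWitnessOut_remove_duplicate_examples.2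
def Claim_exact_remove_duplicate_examples : Prop := ∀ (example_lines : List String) (max_examples : Int), Dom_remove_duplicate_examples example_lines max_examples → D_remove_duplicate_examples example_lines max_examples → remove_duplicate_examples example_lines max_examples ≠ remove_duplicate_examples_alt example_lines max_examples

-- ===== LEMMAS AND PROOFS =====

-- proof-side reformulation of A: the stream of first occurrences, and a bounded take
def pvFirsts (seen : PySem.Set String) (xs : List String) : List String :=
  match xs with
  | [] => []
  | line :: rest =>
    if !(PySem.Set.contains seen line) then line :: pvFirsts (seen.add line) rest
    else pvFirsts seen rest

def pvTake (out : List String) (s : List String) (m : Int) : List String :=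
  match s with
  | [] => out
  | line :: rest =>
    if (out.length : Int) ≥ m then out else pvTake (out ++ [line]) rest m

theorem pvTake_done (out : List String) (s : List String) (m : Int)
    (h : (out.length : Int) ≥ m) : pvTake out s m = out := by
  cases s with
  | nil => rfl
  | cons a t => simp [pvTake, h]

-- A's fused loop equals the accumulator followed by the bounded take of the stream
theorem pvGo_eq (xs : List String) : ∀ (seen : PySem.Set String) (acc : List String) (m : Int),
    (acc.length : Int) < m →
    pvAGo seen acc xs m = pvTake acc (pvFirsts seen xs) m := by
  induction xs with
  | nil => intro seen acc m _; rfl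
  | cons line rest ih =>
    intro seen acc m hlt
    by_cases hmem : PySem.Set.contains seen line = true
    · simp only [pvAGo, pvFirsts, hmem, Bool.not_true, Bool.false_eq_true, if_false]
      rw [if_neg (by omega)]
      exact ih seen acc m hlt
    · have hm' : PySem.Set.contains seen line = false := by simpa using hmem
      simp only [pvAGo, pvFirsts, hm', Bool.not_false, if_true]
      rw [pvTake, if_neg (show ¬ ((acc.length : Int) ≥ m) by omega)]
      by_cases hdone : ((acc ++ [line]).length : Int) ≥ m
      · rw [if_pos hdone, pvTake_done _ _ _ hdone]
      · rw [if_neg hdone]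
        exact ih (seen.add line) (acc ++ [line]) m (by omega)

-- bounded take from an accumulator is append-and-List.take
theorem pvTake_eq_take (s : List String) : ∀ (acc : List String) (m : Int),
    pvTake acc s m = acc ++ s.take (m - acc.length).toNat := by
  induction s with
  | nil => intro acc m; simp [pvTake]
  | cons a t ih =>
    intro acc m
    by_cases h : (acc.length : Int) ≥ m
    · rw [pvTake, if_pos h]
      have h0 : (m - (acc.length : Int)).toNat = 0 := by omega
      simp [h0]
    · rw [pvTake, if_neg h, ih]
      have h1 : (m - ((acc ++ [a]).length : Int)).toNat = (m - acc.length).toNat - 1 := by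
        simp; omega
      rw [h1]
      cases hk : (m - (acc.length : Int)).toNat with
      | zero => omega
      | succ k => simp [List.take_succ_cons]

-- Set.contains as a decidable membership test
theorem set_contains_decide (s : PySem.Set String) (x : String) :
    PySem.Set.contains s x = decide (x ∈ s) := by
  by_cases h : x ∈ s
  · simpa [h] using (PySem.Set.contains_iff s x).mpr h
  · simpa [h] using fun hc => h ((PySem.Set.contains_iff s x).mp hc)

-- last-insert-wins characterisation of a key-value fold into a Dict
theorem get?_foldl_insert_snd (l : List (Int × String)) :
    ∀ (d : PySem.Dict String Int) (v : String),
    (l.foldl (fun d p => d.insert p.2 p.1) d).get? v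
      = ((l.reverse.find? (fun p => p.2 == v)).map (·.1)).or (d.get? v) := by
  induction l with
  | nil => intro d v; simp
  | cons p t ih =>
    intro d v
    rw [List.foldl_cons, ih, List.reverse_cons, List.find?_append]
    by_cases h : p.2 = v
    · subst h
      rw [PySem.Dict.get?_insert_self]
      have hp : List.find? (fun q => q.2 == p.2) [p] = some p := by simp [List.find?]
      rw [hp]
      cases t.reverse.find? (fun q => q.2 == p.2) <;> simp
    · rw [PySem.Dict.get?_insert_of_ne d p.1 (hne := Ne.symm h)]
      have hb : (p.2 == v) = false := by simp [h]
      have hp : List.find? (fun q => q.2 == v) [p] = none := by simp [List.find?, hb]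
      rw [hp]
      cases t.reverse.find? (fun q => q.2 == v) <;> simp

-- first match in an enumeration is index?
theorem find?_enumerate (xs : List String) : ∀ (s : Int) (v : String),
    (PySem.List.enumerate xs s).find? (fun p => p.2 == v)
      = (PySem.List.index? xs v).map (fun k => (s + (k : Int), v)) := by
  induction xs with
  | nil => intro s v; simp [PySem.List.enumerate]
  | cons x t ih =>
    intro s v
    rw [PySem.List.enumerate_cons]
    by_cases h : x = v
    · subst h
      rw [PySem.List.index?_cons_self]
      simp [List.find?]
    · rw [List.find?_cons_of_neg (by simp [h]), ih (s + 1) v,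
          PySem.List.index?_cons_of_ne t h]
      cases PySem.List.index? t v with
      | none => simp
      | some k =>
        simp
        omega

-- the reverse-overwrite map sends each line to its first-occurrence index
theorem get?_pvFirstIdx (xs : List String) (v : String) :
    (pvFirstIdx xs).get? v = (PySem.List.index? xs v).map (fun k => (k : Int)) := by
  unfold pvFirstIdx
  rw [get?_foldl_insert_snd, List.reverse_reverse, find?_enumerate]
  cases PySem.List.index? xs v <;> simp

-- the positional filter over the enumeration is the first-occurrence stream
theorem filter_enumerate_eq_pvFirsts (xs : List String) :
    ∀ (pre : List String) (seen : PySem.Set String),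
    (∀ x, x ∈ (seen : List String) ↔ x ∈ pre) →
    (PySem.List.enumerate xs ((pre.length : Int))).filterMap
        (fun p => if ((PySem.List.index? (pre ++ xs) p.2).map (fun k => (k : Int)) == some p.1)
                  then some p.2 else none)
      = pvFirsts seen xs := by
  induction xs with
  | nil => intro pre seen _; simp [PySem.List.enumerate, pvFirsts]
  | cons line rest ih =>
    intro pre seen hinv
    rw [PySem.List.enumerate_cons, List.filterMap_cons]
    by_cases hmem : line ∈ pre
    · -- duplicate: the first-occurrence index is inside pre, below pre.length
      have hidx : PySem.List.index? (pre ++ line :: rest) line = PySem.List.index? pre line :=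
        PySem.List.index?_append_of_mem _ hmem
      obtain ⟨k, hk⟩ : ∃ k, PySem.List.index? pre line = some k :=
        Option.isSome_iff_exists.mp ((PySem.List.index?_isSome_iff pre line).mpr hmem)
      have hklt : k < pre.length := by
        obtain ⟨hlt, _, _⟩ := PySem.List.getElem_of_index?_eq_some hk
        exact hlt
      have hcond : ((PySem.List.index? (pre ++ line :: rest) line).map (fun k => (k : Int))
          == some ((pre.length : Int))) = false := by
        rw [hidx, hk]
        simp
        omega
      simp only [hcond, Bool.false_eq_true, if_false]
      have hseen : PySem.Set.contains seen line = true := by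
        rw [set_contains_decide]
        simp [(hinv line).mpr hmem]
      rw [pvFirsts]
      simp only [hseen, Bool.not_true, Bool.false_eq_true, if_false]
      have hpre : pre ++ line :: rest = (pre ++ [line]) ++ rest := by simp
      have hlen : ((pre.length : Int)) + 1 = (((pre ++ [line]).length : Int)) := by
        simp
      rw [hpre, hlen]
      exact ih (pre ++ [line]) seen (by
        intro x
        rw [hinv x]
        by_cases hx : x = line
        · subst hx; simp [hmem]
        · simp [hx])
    · -- first occurrence: the index is exactly pre.length, the line is kept
      have hidx : PySem.List.index? (pre ++ line :: rest) line = some pre.length := by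
        have h1 : pre ++ line :: rest = (pre ++ [line]) ++ rest := by simp
        rw [h1, PySem.List.index?_append_of_mem _ (by simp),
            PySem.List.index?_append_singleton_self _ _ hmem]
      have hcond : ((PySem.List.index? (pre ++ line :: rest) line).map (fun k => (k : Int))
          == some ((pre.length : Int))) = true := by
        rw [hidx]; simp
      simp only [hcond, if_true]
      have hseen : PySem.Set.contains seen line = false := by
        rw [set_contains_decide]
        have hns : line ∉ seen := fun hc => hmem ((hinv line).mp hc)
        simp [hns]
      rw [pvFirsts]
      simp only [hseen, Bool.not_false, if_true]
      congr 1
      have hpre : pre ++ line :: rest = (pre ++ [line]) ++ rest := by simp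
      have hlen : ((pre.length : Int)) + 1 = (((pre ++ [line]).length : Int)) := by
        simp
      rw [hpre, hlen]
      exact ih (pre ++ [line]) (seen.add line) (by
        intro x
        rw [PySem.Set.mem_add]
        constructor
        · rintro (hx | hx)
          · simp [(hinv x).mp hx]
          · subst hx; simp
        · intro hx
          rcases List.mem_append.mp hx with hx | hx
          · exact Or.inl ((hinv x).mpr hx)
          · exact Or.inr (by simpa using hx))

-- B's dedup comprehension is the first-occurrence stream from an empty seen set
theorem alt_deduped_eq_pvFirsts (xs : List String) :
    (PySem.List.enumerate xs).filterMap
        (fun p => if ((pvFirstIdx xs).get? p.2 == some p.1) then some p.2 else none)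
      = pvFirsts (PySem.Set.ofList []) xs := by
  have hfun : (fun (p : Int × String) => if ((pvFirstIdx xs).get? p.2 == some p.1) then some p.2 else none)
      = (fun p => if ((PySem.List.index? (([] : List String) ++ xs) p.2).map (fun k => (k : Int)) == some p.1)
                  then some p.2 else none) := by
    funext p
    rw [get?_pvFirstIdx]
    simp
  rw [hfun]
  have h0 : (0 : Int) = ((([] : List String).length : Int)) := by simp
  rw [show PySem.List.enumerate xs = PySem.List.enumerate xs ((([] : List String).length : Int)) from by simp]
  exact filter_enumerate_eq_pvFirsts xs [] (PySem.Set.ofList []) (by intro x; simp [PySem.Set.ofList])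

-- ===== VERDICT (by name: the statement is the Claim_ definition above) =====
theorem remove_duplicate_examples_spec : Claim_unchanged_remove_duplicate_examples := by
  intro xs m _ hnd
  unfold D_remove_duplicate_examples at hnd
  by_cases hm : m ≤ 0
  · have hxs : xs = [] := by
      by_contra h
      exact (hnd ⟨hm, h⟩).elim
    subst hxs
    simp [remove_duplicate_examples, remove_duplicate_examples_alt, pvAGo, pvFirstIdx,
      PySem.List.enumerate, PySem.List.slice]
  · have hmax : max m 0 = m := by omega
    unfold remove_duplicate_examples remove_duplicate_examples_alt
    show pvAGo (PySem.Set.ofList []) [] xs m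
      = PySem.List.slice ((PySem.List.enumerate xs).filterMap
          (fun p => if ((pvFirstIdx xs).get? p.2 == some p.1) then some p.2 else none))
          none (some (max m 0))
    rw [pvGo_eq xs _ [] m (by simp; omega), pvTake_eq_take, alt_deduped_eq_pvFirsts, hmax,
        PySem.List.slice_to _ (by omega)]
    simp

theorem remove_duplicate_examples_changed : Claim_changed_remove_duplicate_examples := by
  unfold Claim_changed_remove_duplicate_examples; decide

theorem remove_duplicate_examples_tight : Claim_exact_remove_duplicate_examples := by
  intro xs m _ hd
  obtain ⟨hm, hne⟩ := hd
  cases xs with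
  | nil => exact absurd rfl hne
  | cons x rest =>
    have hA : remove_duplicate_examples (x :: rest) m = [x] := by
      simp [remove_duplicate_examples, pvAGo, PySem.Set.contains, PySem.Set.ofList]
      intro h; exact absurd h (by omega)
    have hmax : max m 0 = 0 := by omega
    have hB : remove_duplicate_examples_alt (x :: rest) m = [] := by
      unfold remove_duplicate_examples_alt
      rw [hmax, PySem.List.slice_to _ (by omega)]
      simp
    simp [hA, hB]
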